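-- pv_equiv track=rewrite | github.com/volcengine/verl | atropos/environments/intern_bootcamp/internbootcamp_lib/internbootcamp/bootcamp/cpackagedelivery/cpackagedelivery.py | compute_min_cost
-- ===== SOURCE A (Python) =====
-- def compute_min_cost(d, n, m, stations):
--     sorted_stations = sorted(stations + [(d, 0)], key=lambda x: x[0])
--     prev_pos = 0
--     for x, _ in sorted_stations:
--         if x - prev_pos > n:
--             return -1
--         prev_pos = x
--
--     stack = []
--     next_lower = [None] * len(sorted_stations)
--
--     # Preprocess next_lower using monotonic stack
--     for i in reversed(range(len(sorted_stations))):
--         while stack and sorted_stations[stack[-1]][1] >= sorted_stations[i][1]: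
--             stack.pop()
--         if stack:
--             next_lower[i] = stack[-1]
--         else:
--             next_lower[i] = None
--         stack.append(i)
--
--     current_pos = 0
--     current_fuel = n
--     total_cost = 0
--
--     for i, (x, p) in enumerate(sorted_stations):
--         distance = x - current_pos
--         current_fuel -= distance
--         if current_fuel < 0:
--             return -1
--         current_pos = x
--
--         if x == d:
--             break
--
--         j = next_lower[i]
--         if j is None:
--             max_reach = min(current_pos + n, d)
--             buy = min(n - current_fuel, max_reach - x)
--             if buy < 0:
--                 continue
--             total_cost += buy * p
--             current_fuel += buy
--         else:
--             max_reach = sorted_stations[j][0]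
--             required = max(0, (max_reach - x) - current_fuel)
--             buy = min(required, n - current_fuel)
--             total_cost += buy * p
--             current_fuel += buy
--
--         if current_fuel < 0:
--             return -1
--
--     return total_cost if current_pos == d else -1
-- ===== SOURCE B (Python) =====
-- def compute_min_cost(d, n, m, stations):
--     # Simpler: no monotonic-stack precomputation; the next cheaper station is
--     # found by a direct lookahead scan at each stop.
--     order = sorted(stations + [(d, 0)], key=lambda s: s[0])
--     xs = [x for x, _ in order]
--     if any(b - a > n for a, b in zip([0] + xs, xs)):
--         return -1
--     pos, fuel, cost = 0, n, 0
--     for idx, (x, p) in enumerate(order):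
--         fuel -= x - pos
--         if fuel < 0:
--             return -1
--         pos = x
--         if x == d:
--             return cost
--         target = next((y for y, q in order[idx + 1:] if q < p), None)
--         if target is None:
--             buy = min(n - fuel, min(x + n, d) - x)
--             if buy < 0:
--                 continue
--         else:
--             buy = min(max(0, target - x - fuel), n - fuel)
--         cost += buy * p
--         fuel += buy
--         if fuel < 0:
--             return -1
--     return cost if pos == d else -1
-- ===== Notes on version B (the rewrite author's own statement) =====
-- stated objective: simpler
-- what changed: Replaced A's reversed monotonic-stack precomputation of a next_lower index array (plus index-based lookups in the main loop) with a direct lookahead scan for the next cheaper station at each stop, and the early-return feasibility loop with an any() over adjacent position pairs.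
import Mathlib
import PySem

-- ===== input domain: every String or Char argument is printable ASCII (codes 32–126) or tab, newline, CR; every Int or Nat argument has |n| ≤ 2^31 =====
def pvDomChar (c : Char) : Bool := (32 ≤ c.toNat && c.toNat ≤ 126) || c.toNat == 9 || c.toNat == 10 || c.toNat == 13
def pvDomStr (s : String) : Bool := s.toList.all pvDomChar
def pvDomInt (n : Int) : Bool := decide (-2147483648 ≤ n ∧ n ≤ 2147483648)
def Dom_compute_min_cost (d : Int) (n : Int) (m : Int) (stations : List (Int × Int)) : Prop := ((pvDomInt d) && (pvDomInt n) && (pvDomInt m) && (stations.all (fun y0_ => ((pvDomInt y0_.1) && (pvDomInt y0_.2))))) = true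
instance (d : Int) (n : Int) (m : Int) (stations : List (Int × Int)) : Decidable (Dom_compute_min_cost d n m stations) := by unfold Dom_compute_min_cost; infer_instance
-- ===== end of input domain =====

-- B replaces A's monotonic-stack next_lower precomputation by a direct lookahead
-- scan for the next cheaper station at each stop (objective: simpler, no speed claim).

-- ===== PORT A =====

-- feasibility loop: 'for x,_ in sorted_stations: if x - prev_pos > n: return -1'
def cmcGapA (n : Int) (prev : Int) : List (Int × Int) → Bool
  | [] => false
  | (x, _) :: rest => if x - prev > n then true else cmcGapA n x rest

-- 'while stack and sorted_stations[stack[-1]][1] >= sorted_stations[i][1]: stack.pop()'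
-- (stack top = list head; indices on the stack are always in range, so getD is exact)
def cmcPopGE (S : List (Int × Int)) (pi : Int) : List Nat → List Nat
  | [] => []
  | j :: s => if (S.getD j (0, 0)).2 ≥ pi then cmcPopGE S pi s else j :: s

-- 'for i in reversed(range(len(sorted_stations))): …' building next_lower back to front
def cmcNL (S : List (Int × Int)) : Nat → List Nat → List (Option Nat) → List (Option Nat)
  | 0, _, nl => nl
  | k + 1, stack, nl =>
    let s := cmcPopGE S (S.getD k (0, 0)).2 stack
    cmcNL S k (k :: s) (s.head? :: nl)

-- main 'for i, (x, p) in enumerate(sorted_stations):' loop; early returns become results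
def cmcMainA (d n : Int) (S : List (Int × Int)) (nl : List (Option Nat)) :
    List (Int × Int) → Nat → Int → Int → Int → Int
  | [], _, pos, _, cost => if pos = d then cost else -1
  | (x, p) :: rest, i, pos, fuel, cost =>
    let fuel1 := fuel - (x - pos)
    if fuel1 < 0 then -1
    else if x = d then cost   -- break; then 'return total_cost if current_pos == d else -1' with current_pos = x = d
    else
      match nl.getD i none with
      | none =>
        let maxReach := min (x + n) d
        let buy := min (n - fuel1) (maxReach - x)
        if buy < 0 then cmcMainA d n S nl rest (i + 1) x fuel1 cost   -- continue
        else
          let cost1 := cost + buy * p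
          let fuel2 := fuel1 + buy
          if fuel2 < 0 then -1 else cmcMainA d n S nl rest (i + 1) x fuel2 cost1
      | some j =>
        let maxReach := (S.getD j (0, 0)).1
        let buy := min (max 0 ((maxReach - x) - fuel1)) (n - fuel1)
        let cost1 := cost + buy * p
        let fuel2 := fuel1 + buy
        if fuel2 < 0 then -1 else cmcMainA d n S nl rest (i + 1) x fuel2 cost1

def compute_min_cost (d : Int) (n : Int) (m : Int) (stations : List (Int × Int)) : Int :=
  let S := PySem.List.sorted (stations ++ [(d, 0)]) (fun s => s.1) false
  if cmcGapA n 0 S then -1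
  else cmcMainA d n S (cmcNL S S.length [] []) S 0 0 n 0

-- ===== PORT B =====

-- 'next((y for y, q in order[idx+1:] if q < p), None)'
def cmcFindLower (p : Int) : List (Int × Int) → Option Int
  | [] => none
  | (y, q) :: rest => if q < p then some y else cmcFindLower p rest

-- 'any(b - a > n for a, b in zip([0] + xs, xs))'
def cmcGapB (n : Int) (S : List (Int × Int)) : Bool :=
  let xs := S.map (fun s => s.1)
  ((0 :: xs).zip xs).any (fun ab => decide (ab.2 - ab.1 > n))

def cmcMainB (d n : Int) : List (Int × Int) → Int → Int → Int → Int
  | [], pos, _, cost => if pos = d then cost else -1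
  | (x, p) :: rest, pos, fuel, cost =>
    let fuel1 := fuel - (x - pos)
    if fuel1 < 0 then -1
    else if x = d then cost
    else
      match cmcFindLower p rest with
      | none =>
        let buy := min (n - fuel1) (min (x + n) d - x)
        if buy < 0 then cmcMainB d n rest x fuel1 cost
        else
          let cost1 := cost + buy * p
          let fuel2 := fuel1 + buy
          if fuel2 < 0 then -1 else cmcMainB d n rest x fuel2 cost1
      | some y =>
        let buy := min (max 0 ((y - x) - fuel1)) (n - fuel1)
        let cost1 := cost + buy * p
        let fuel2 := fuel1 + buy
        if fuel2 < 0 then -1 else cmcMainB d n rest x fuel2 cost1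

def compute_min_cost_alt (d : Int) (n : Int) (m : Int) (stations : List (Int × Int)) : Int :=
  let S := PySem.List.sorted (stations ++ [(d, 0)]) (fun s => s.1) false
  if cmcGapB n S then -1
  else cmcMainB d n S 0 n 0

-- ===== PRECONDITION & SPEC =====
def Spec_compute_min_cost (d : Int) (n : Int) (m : Int) (stations : List (Int × Int)) (out : Int) : Prop := out = compute_min_cost_alt d n m stations
instance (d : Int) (n : Int) (m : Int) (stations : List (Int × Int)) (out : Int) : Decidable (Spec_compute_min_cost d n m stations out) := by unfold Spec_compute_min_cost; infer_instance

-- ===== CLAIM (what is proved, stated in full; the proofs are below) =====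
def Claim_equal_compute_min_cost : Prop := ∀ (d : Int) (n : Int) (m : Int) (stations : List (Int × Int)), Dom_compute_min_cost d n m stations → Spec_compute_min_cost d n m stations (compute_min_cost d n m stations)

-- ===== LEMMAS AND PROOFS =====

-- the feasibility checks agree
theorem cmcGap_eq (n : Int) (prev : Int) (S : List (Int × Int)) :
    cmcGapA n prev S
      = ((prev :: S.map (fun s => s.1)).zip (S.map (fun s => s.1))).any
          (fun ab => decide (ab.2 - ab.1 > n)) := by
  induction S generalizing prev with
  | nil => rfl
  | cons hd tl ih =>
    obtain ⟨x, p⟩ := hd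
    simp only [cmcGapA, List.map_cons, List.zip_cons_cons, List.any_cons]
    rw [ih x]
    by_cases h : x - prev > n <;> simp [h]

-- index of the first station at position ≥ k whose price is below q
def cmcFirstBelow (S : List (Int × Int)) (k : Nat) (q : Int) : Option Nat :=
  (List.range' k (S.length - k)).find? (fun j => decide ((S.getD j (0, 0)).2 < q))

-- the stack invariant of A's monotonic-stack pass
def cmcInv (S : List (Int × Int)) (k : Nat) (stack : List Nat) : Prop :=
  ∀ q : Int, (cmcPopGE S q stack).head? = cmcFirstBelow S k q

theorem cmcPopGE_popGE (S : List (Int × Int)) (p q : Int) (h : q ≤ p) (s : List Nat) :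
    cmcPopGE S q (cmcPopGE S p s) = cmcPopGE S q s := by
  induction s with
  | nil => rfl
  | cons j s' ih =>
    simp only [cmcPopGE]
    by_cases hp : (S.getD j (0, 0)).2 ≥ p
    · rw [if_pos hp, ih, if_pos (le_trans h hp)]
    · rw [if_neg hp]
      simp only [cmcPopGE]

theorem cmcInv_nil (S : List (Int × Int)) : cmcInv S S.length [] := by
  intro q
  simp [cmcPopGE, cmcFirstBelow]

theorem cmcInv_step (S : List (Int × Int)) (k : Nat) (hk : k < S.length) (s : List Nat)
    (hinv : cmcInv S (k + 1) s) :
    cmcInv S k (k :: cmcPopGE S (S.getD k (0, 0)).2 s) := by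
  intro q
  have hrange : List.range' k (S.length - k) = k :: List.range' (k + 1) (S.length - (k + 1)) := by
    have h1 : S.length - k = (S.length - (k + 1)) + 1 := by omega
    rw [h1, List.range'_succ]
  by_cases hq : (S.getD k (0, 0)).2 ≥ q
  · have : cmcPopGE S q (k :: cmcPopGE S (S.getD k (0, 0)).2 s)
        = cmcPopGE S q s := by
      simp only [cmcPopGE, if_pos hq]
      exact cmcPopGE_popGE S _ q hq s
    rw [this, hinv q, cmcFirstBelow, cmcFirstBelow, hrange, List.find?_cons]
    have : decide ((S.getD k (0, 0)).2 < q) = false := by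
      rw [decide_eq_false_iff_not]; omega
    rw [this]
  · have hlt : (S.getD k (0, 0)).2 < q := by omega
    have : cmcPopGE S q (k :: cmcPopGE S (S.getD k (0, 0)).2 s)
        = k :: cmcPopGE S (S.getD k (0, 0)).2 s := by
      simp only [cmcPopGE, if_neg hq]
    rw [this, cmcFirstBelow, hrange, List.find?_cons]
    have : decide ((S.getD k (0, 0)).2 < q) = true := decide_eq_true hlt
    rw [this]
    rfl

theorem cmcNL_spec (S : List (Int × Int)) (k : Nat) (hk : k ≤ S.length)
    (s : List Nat) (hinv : cmcInv S k s) (acc : List (Option Nat)) :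
    cmcNL S k s acc
      = (List.range k).map (fun i => cmcFirstBelow S (i + 1) (S.getD i (0, 0)).2) ++ acc := by
  induction k generalizing s acc with
  | zero => simp [cmcNL]
  | succ k ih =>
    have hk' : k < S.length := by omega
    simp only [cmcNL]
    rw [ih (by omega) _ (cmcInv_step S k hk' s hinv)]
    have hentry : (cmcPopGE S (S.getD k (0, 0)).2 s).head?
        = cmcFirstBelow S (k + 1) (S.getD k (0, 0)).2 := hinv _
    rw [hentry, List.range_succ, List.map_append]
    simp

-- firstBelow, pushed through the station coordinates, is B's lookahead scan on the suffix
theorem cmcFirstBelow_drop (S : List (Int × Int)) (m k : Nat) (hm : S.length - k = m) (q : Int) :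
    (cmcFirstBelow S k q).map (fun j => (S.getD j (0, 0)).1) = cmcFindLower q (S.drop k) := by
  induction m generalizing k with
  | zero =>
    have hk : S.length ≤ k := by omega
    rw [cmcFirstBelow, hm]
    simp [List.drop_eq_nil_of_le hk, cmcFindLower]
  | succ m ih =>
    have hk : k < S.length := by omega
    have hdrop : S.drop k = S[k] :: S.drop (k + 1) := List.drop_eq_getElem_cons hk
    have hget : S.getD k (0, 0) = S[k] := List.getD_eq_getElem S (0, 0) hk
    have hLk : S.length - (k + 1) = m := by omega
    have hstep : cmcFirstBelow S k q
        = if S[k].2 < q then some k else cmcFirstBelow S (k + 1) q := by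
      by_cases hq : S[k].2 < q
      · rw [if_pos hq, cmcFirstBelow, hm, List.range'_succ]
        exact List.find?_cons_of_pos (by rw [hget]; exact decide_eq_true hq)
      · rw [if_neg hq, cmcFirstBelow, hm, List.range'_succ,
          List.find?_cons_of_neg (by rw [hget]; simpa using hq)]
        rw [cmcFirstBelow, hLk]
    rw [hstep, hdrop]
    rcases hSk : S[k] with ⟨y, pp⟩
    rw [hSk] at hget
    simp only [cmcFindLower]
    by_cases hq : pp < q
    · rw [if_pos hq, if_pos hq, Option.map_some, hget]
    · rw [if_neg hq, if_neg hq]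
      exact ih (k + 1) (by omega)

-- the two main loops agree on every suffix
theorem cmcMain_eq (d n : Int) (S : List (Int × Int)) (rest : List (Int × Int)) (i : Nat)
    (hrest : S.drop i = rest) (pos fuel cost : Int) :
    cmcMainA d n S ((List.range S.length).map
        (fun j => cmcFirstBelow S (j + 1) (S.getD j (0, 0)).2)) rest i pos fuel cost
      = cmcMainB d n rest pos fuel cost := by
  induction rest generalizing i pos fuel cost with
  | nil => rfl
  | cons hd rest' ih =>
    obtain ⟨x, p⟩ := hd
    have hi : i < S.length := by
      by_contra h
      rw [List.drop_eq_nil_of_le (by omega)] at hrest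
      simp at hrest
    have hSi : S[i] = (x, p) := by
      have h0 : (S.drop i)[0]'(by rw [hrest]; simp) = S[i + 0] := List.getElem_drop
      simp only [Nat.add_zero] at h0
      rw [← h0]
      simp [hrest]
    have hrest' : S.drop (i + 1) = rest' := by
      have : (S.drop i).drop 1 = S.drop (i + 1) := by rw [List.drop_drop]
      rw [← this, hrest]
      rfl
    have hnl : ((List.range S.length).map
        (fun j => cmcFirstBelow S (j + 1) (S.getD j (0, 0)).2)).getD i none
        = cmcFirstBelow S (i + 1) (S.getD i (0, 0)).2 :=
      PySem.List.getD_map_range _ _ _ _ hi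
    have hget : S.getD i (0, 0) = (x, p) := by
      rw [List.getD_eq_getElem S (0, 0) hi, hSi]
    have hfb : (cmcFirstBelow S (i + 1) p).map (fun j => (S.getD j (0, 0)).1)
        = cmcFindLower p rest' := by
      rw [cmcFirstBelow_drop S (S.length - (i + 1)) (i + 1) rfl p, hrest']
    simp only [cmcMainA, cmcMainB, hnl, hget]
    by_cases h1 : fuel - (x - pos) < 0
    · simp [h1]
    · by_cases h2 : x = d
      · simp [h2]
      · simp only [if_neg h1, if_neg h2]
        cases hcase : cmcFirstBelow S (i + 1) p with
        | none =>
          have hfl : cmcFindLower p rest' = none := by rw [← hfb, hcase]; rfl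
          simp only [hfl]
          by_cases h3 : min (n - (fuel - (x - pos))) (min (x + n) d - x) < 0
          · simp only [if_pos h3]
            exact ih (i + 1) hrest' x _ cost
          · simp only [if_neg h3]
            split_ifs with h4
            · rfl
            · exact ih (i + 1) hrest' x _ _
        | some j =>
          have hfl : cmcFindLower p rest' = some (S.getD j (0, 0)).1 := by
            rw [← hfb, hcase]; rfl
          simp only [hfl]
          split_ifs with h4
          · rfl
          · exact ih (i + 1) hrest' x _ _

-- ===== VERDICT (by name: the statement is the Claim_ definition above) =====
theorem compute_min_cost_spec : Claim_equal_compute_min_cost := by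
  intro d n m stations _
  unfold Spec_compute_min_cost
  simp only [compute_min_cost, compute_min_cost_alt]
  generalize PySem.List.sorted (stations ++ [(d, 0)]) (fun s => s.1) false = S
  rw [cmcGap_eq n 0 S]
  by_cases hg : ((0 :: S.map (fun s => s.1)).zip (S.map (fun s => s.1))).any
      (fun ab => decide (ab.2 - ab.1 > n))
  · simp [cmcGapB, hg]
  · simp only [cmcGapB, hg, if_neg, Bool.false_eq_true, not_false_eq_true]
    rw [cmcNL_spec S S.length (le_refl _) [] (cmcInv_nil S) [], List.append_nil]
    exact cmcMain_eq d n S S 0 (by simp) 0 n 0
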